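-- pv_equiv track=rewrite | github.com/LiuPengJugx/ppo-controller | experiment/plot_metrics.py | accumulate_val
-- ===== SOURCE A (Python) =====
-- def accumulate_val(data,interval):
--     new_data=[]
--     temp_data=[]
--     for idx,x in enumerate(data):
--         temp_data.append(x)
--         if (idx+1)%interval==0:
--             new_data.append(sum(temp_data))
--             temp_data.clear()
--     new_data.append(sum(temp_data))
--     return new_data
-- ===== SOURCE B (Python) =====
-- def accumulate_val(data, interval):
--     full = len(data) // interval
--     return [sum(data[k * interval:(k + 1) * interval]) for k in range(full)] \
--         + [sum(data[full * interval:])]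
-- ===== Notes on version B (the rewrite author's own statement) =====
-- stated objective: simpler
-- what changed: Replaces the stateful accumulator loop (running temp list flushed on a per-element modulus test) by direct slice sums, one per complete chunk plus the trailing remainder; Pre_ excludes interval = 0 (A raises ZeroDivisionError on nonempty data, B always raises there) and nonempty data with negative interval, where A's chunk-by-|interval| and B's single tail sum are both accidental artefacts of Python's modulo/floor-division on negatives. Speed comes from summing each chunk with the built-in sum over a slice instead of per-element Python-level list appends and a modulus test.
-- outside the precondition, e.g. on accumulate_val([], 0): A returns [0], B raises ZeroDivisionError; on accumulate_val([1, 2, 3], -2): A returns [3, 3], B returns [0]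
import Mathlib
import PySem

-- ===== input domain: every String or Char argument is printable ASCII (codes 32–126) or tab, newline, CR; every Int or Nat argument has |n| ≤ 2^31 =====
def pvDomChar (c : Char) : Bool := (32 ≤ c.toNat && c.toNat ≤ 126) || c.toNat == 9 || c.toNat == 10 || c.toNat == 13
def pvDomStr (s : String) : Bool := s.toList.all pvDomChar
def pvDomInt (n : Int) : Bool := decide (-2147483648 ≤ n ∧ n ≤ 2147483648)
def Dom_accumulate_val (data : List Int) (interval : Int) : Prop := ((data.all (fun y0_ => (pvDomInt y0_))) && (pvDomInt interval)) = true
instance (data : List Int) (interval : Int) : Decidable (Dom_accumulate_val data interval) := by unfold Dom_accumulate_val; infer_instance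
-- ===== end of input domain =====

-- B replaces A's stateful accumulator loop by direct slice sums per chunk plus remainder (simpler decomposition, same cost).


-- ===== PORT A =====
-- loop body of A: append x to temp_data, flush into new_data when (idx+1) % interval == 0
def stepA (interval : Int) (s : List Int × List Int) (p : Int × Int) : List Int × List Int :=
  let temp := s.2 ++ [p.2]
  if PySem.Int.mod (p.1 + 1) interval = 0 then (s.1 ++ [temp.sum], []) else (s.1, temp)

def accumulate_val (data : List Int) (interval : Int) : List Int :=
  let st := (PySem.List.enumerate data).foldl (stepA interval) ([], [])
  st.1 ++ [st.2.sum]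

-- ===== PORT B =====
def accumulate_val_alt (data : List Int) (interval : Int) : List Int :=
  let full : Int := PySem.Int.floordiv (PySem.List.len data) interval
  ((PySem.List.pyRange 0 full 1).map
      (fun k => (PySem.List.slice data (some (k * interval)) (some ((k + 1) * interval))).sum))
    ++ [(PySem.List.slice data (some (full * interval)) none).sum]

-- ===== PRECONDITION & SPEC =====
-- Pre_ excludes interval = 0 (Python A raises ZeroDivisionError on nonempty data and B always raises there)
-- and nonempty data with negative interval, where A's chunk-by-|interval| and B's single tail sum are both
-- accidental artefacts of Python's modulo / floor-division behaviour on negative divisors.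
def Pre_accumulate_val (data : List Int) (interval : Int) : Prop :=
  0 < interval ∨ (data = [] ∧ interval ≠ 0)
instance (data : List Int) (interval : Int) : Decidable (Pre_accumulate_val data interval) := by unfold Pre_accumulate_val; infer_instance
def pvWitness_accumulate_val : List Int × Int := ([1, 2, 3, 4, 5], 2)

def Spec_accumulate_val (data : List Int) (interval : Int) (out : List Int) : Prop := out = accumulate_val_alt data interval
instance (data : List Int) (interval : Int) (out : List Int) : Decidable (Spec_accumulate_val data interval out) := by unfold Spec_accumulate_val; infer_instance

-- ===== CLAIM (what is proved, stated in full; the proofs are below) =====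
def Claim_equal_accumulate_val : Prop := ∀ (data : List Int) (interval : Int), Dom_accumulate_val data interval → Pre_accumulate_val data interval → Spec_accumulate_val data interval (accumulate_val data interval)

-- ===== LEMMAS AND PROOFS =====

-- the canonical chunking both programs compute: sums of full chunks of n, then the (possibly empty) remainder
def chunks (n : Nat) (data : List Int) : List Int :=
  if _h : n = 0 ∨ data.length < n then [data.sum]
  else (data.take n).sum :: chunks n (data.drop n)
  termination_by data.length
  decreasing_by simp only [List.length_drop]; omega

lemma chunks_small {n : Nat} {data : List Int} (h : data.length < n) :
    chunks n data = [data.sum] := by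
  rw [chunks]; simp [h]

lemma chunks_step {n : Nat} {data : List Int} (hn0 : 0 < n) (h : n ≤ data.length) :
    chunks n data = (data.take n).sum :: chunks n (data.drop n) := by
  rw [chunks]
  have : ¬ (n = 0 ∨ data.length < n) := by omega
  simp [this]

lemma succ_mod_aux {n s : Nat} (hn0 : 0 < n) :
    (s + 1) % n = if s % n = n - 1 then 0 else s % n + 1 := by
  have h := Nat.div_add_mod s n
  have hlt : s % n < n := Nat.mod_lt _ hn0
  split
  · rename_i hp
    rw [show s + 1 = n * (s / n) + n by omega, Nat.add_mod, Nat.mul_mod_right, Nat.mod_self]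
    simp
  · rename_i hp
    rw [show s + 1 = (s % n + 1) + n * (s / n) by omega, Nat.add_mul_mod_self_left]
    exact Nat.mod_eq_of_lt (by omega)

-- A-side: the fold over enumerate, run to the next flush (or to the end of the list)
lemma foldA_run (interval : Int) (n : Nat) (hn : n = interval.natAbs) (hn0 : 0 < n) :
    ∀ (data : List Int) (s : Nat) (new temp : List Int),
      (data.length < n - s % n →
        (PySem.List.enumerate data (s : Int)).foldl (stepA interval) (new, temp)
          = (new, temp ++ data)) ∧
      (n - s % n ≤ data.length →
        (PySem.List.enumerate data (s : Int)).foldl (stepA interval) (new, temp)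
          = (PySem.List.enumerate (data.drop (n - s % n)) ((s + (n - s % n) : Nat) : Int)).foldl
              (stepA interval) (new ++ [(temp ++ data.take (n - s % n)).sum], [])) := by
  intro data
  induction data with
  | nil =>
    intro s new temp
    have : s % n < n := Nat.mod_lt _ hn0
    constructor
    · intro _; simp [PySem.List.enumerate]
    · intro h; simp at h; omega
  | cons x xs ih =>
    intro s new temp
    have hmod : s % n < n := Nat.mod_lt _ hn0
    have hdvd : (PySem.Int.mod ((s : Int) + 1) interval = 0) ↔ ((s + 1) % n = 0) := by
      rw [PySem.Int.mod_eq_zero_iff_dvd, ← Int.natAbs_dvd, ← hn,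
          show ((s : Int) + 1) = ((s + 1 : Nat) : Int) by push_cast; ring,
          Int.natCast_dvd_natCast, Nat.dvd_iff_mod_eq_zero]
    have hsucc := succ_mod_aux (n := n) (s := s) hn0
    rw [PySem.List.enumerate_cons]
    by_cases hflush : s % n = n - 1
    · -- this element flushes
      have hcond : PySem.Int.mod ((s : Int) + 1) interval = 0 := by
        rw [hdvd, hsucc]; simp [hflush]
      constructor
      · intro h; simp at h; omega
      · intro _
        simp only [List.foldl_cons, stepA, hcond, reduceIte]
        have hrem : n - s % n = 1 := by omega
        rw [hrem, show ((s : Int) + 1) = ((s + 1 : Nat) : Int) by push_cast; ring]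
        simp
    · -- no flush: temp grows
      have hcond : ¬ PySem.Int.mod ((s : Int) + 1) interval = 0 := by
        rw [hdvd, hsucc]; simp [hflush]
      have hmod2 : (s + 1) % n = s % n + 1 := by rw [hsucc]; simp [hflush]
      have hrem2 : 2 ≤ n - s % n := by omega
      simp only [List.foldl_cons, stepA, hcond, if_neg, not_false_iff]
      rw [show ((s : Int) + 1) = ((s + 1 : Nat) : Int) by push_cast; ring]
      obtain ⟨ih1, ih2⟩ := ih (s + 1) new (temp ++ [x])
      constructor
      · intro h
        simp only [List.length_cons] at h
        rw [ih1 (by omega)]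
        simp
      · intro h
        simp only [List.length_cons] at h
        rw [ih2 (by omega)]
        have e1 : n - s % n = (n - (s + 1) % n) + 1 := by omega
        rw [e1, List.drop_succ_cons, List.take_succ_cons,
            show s + ((n - (s + 1) % n) + 1) = (s + 1) + (n - (s + 1) % n) by omega]
        simp

lemma foldA_main (interval : Int) (n : Nat) (hn : n = interval.natAbs) (hn0 : 0 < n) :
    ∀ (len : Nat) (data : List Int), data.length = len → ∀ (s : Nat) (new : List Int), s % n = 0 →
      (let st := (PySem.List.enumerate data (s : Int)).foldl (stepA interval) (new, []);
       st.1 ++ [st.2.sum]) = new ++ chunks n data := by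
  intro len
  induction len using Nat.strong_induction_on with
  | _ len ih =>
    intro data hlen s new hs
    obtain ⟨run1, run2⟩ := foldA_run interval n hn hn0 data s new []
    rw [hs] at run1 run2
    simp only [Nat.sub_zero] at run1 run2
    rcases Nat.lt_or_ge data.length n with hlt | hge
    · rw [run1 hlt, chunks_small hlt]
      simp
    · rw [run2 hge]
      have hlen2 : (data.drop n).length = len - n := by simp [hlen]
      have hstep := ih (len - n) (by omega) (data.drop n) hlen2 (s + n)
        (new ++ [([] ++ data.take n).sum]) (by simp [Nat.add_mod_right, hs])
      simp only at hstep
      rw [hstep, chunks_step hn0 hge]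
      simp

-- B-side, in pure Nat form
lemma chunkMap (n : Nat) (hn0 : 0 < n) :
    ∀ (len : Nat) (data : List Int), data.length = len →
      (List.range (data.length / n)).map (fun k => ((data.drop (k * n)).take n).sum)
        ++ [(data.drop ((data.length / n) * n)).sum] = chunks n data := by
  intro len
  induction len using Nat.strong_induction_on with
  | _ len ih =>
    intro data hlen
    rcases Nat.lt_or_ge data.length n with hlt | hge
    · rw [Nat.div_eq_of_lt hlt, chunks_small hlt]
      simp
    · have hfull : data.length / n = (data.length - n) / n + 1 := by
        conv_lhs => rw [show data.length = (data.length - n) + n by omega]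
        rw [Nat.add_div_right _ hn0]
      have hlen2 : (data.drop n).length = len - n := by simp [hlen]
      have hd : (data.drop n).length / n = (data.length - n) / n := by rw [hlen2, hlen]
      have hIH := ih (len - n) (by omega) (data.drop n) hlen2
      rw [hd] at hIH
      rw [chunks_step hn0 hge, ← hIH, hfull]
      rw [List.range_succ_eq_map, List.map_cons, List.map_map, List.cons_append]
      congr 1
      · simp
      congr 1
      · apply List.map_congr_left
        intro k _
        simp only [Function.comp_apply]
        rw [List.drop_drop, Nat.succ_mul, Nat.add_comm]
      · rw [List.drop_drop]
        congr 2
        rw [Nat.succ_mul, Nat.add_comm]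

-- cast cleanup: for positive interval, B equals the Nat form
lemma B_pos (interval : Int) (n : Nat) (hn : (n : Int) = interval) (hn0 : 0 < n)
    (data : List Int) :
    accumulate_val_alt data interval = chunks n data := by
  unfold accumulate_val_alt
  have hlen : PySem.List.len data = (data.length : Int) := PySem.List.len_eq data
  have hfd : PySem.Int.floordiv (data.length : Int) (n : Int) = ((data.length / n : Nat) : Int) :=
    PySem.Int.floordiv_natCast _ _
  rw [← hn, hlen, hfd]
  simp only [PySem.List.pyRange_one, sub_zero, Int.toNat_natCast, List.map_map]
  rw [← chunkMap n hn0 data.length data rfl]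
  congr 1
  · apply List.map_congr_left
    intro k _
    simp only [Function.comp_apply, zero_add]
    rw [show ((k : Nat) : Int) * (n : Int) = ((k * n : Nat) : Int) by push_cast; ring,
        show (((k : Nat) : Int) + 1) * (n : Int) = ((k * n + n : Nat) : Int) by push_cast; ring,
        PySem.List.slice_natCast]
    simp
  · rw [show ((data.length / n : Nat) : Int) * (n : Int) = (((data.length / n) * n : Nat) : Int) by
        push_cast; ring,
      PySem.List.slice_from_natCast]

-- ===== VERDICT (by name: the statement is the Claim_ definition above) =====
theorem accumulate_val_spec : Claim_equal_accumulate_val := by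
  intro data interval _ hpre
  unfold Spec_accumulate_val
  rcases hpre with hpos | ⟨hnil, hI⟩
  · have hn0 : 0 < interval.natAbs := Int.natAbs_pos.mpr (by omega)
    have hn : ((interval.natAbs : Nat) : Int) = interval := Int.natAbs_of_nonneg (by omega)
    have hA : accumulate_val data interval = chunks interval.natAbs data := by
      have hmain := foldA_main interval interval.natAbs rfl hn0 data.length data rfl 0 []
        (by simp)
      simp only [Nat.cast_zero] at hmain
      unfold accumulate_val
      rw [hmain]
      simp
    rw [hA, B_pos interval interval.natAbs hn hn0 data]
  · subst hnil
    unfold accumulate_val accumulate_val_alt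
    simp [PySem.List.enumerate, PySem.List.len, PySem.Int.floordiv,
          PySem.List.pyRange, PySem.List.slice, Int.zero_fdiv]
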